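-- pv_equiv track=rewrite | github.com/p-siriphanthong/coding-competitions | Facebook Hacker Cup 2021 - Qualification Round/Problem A1: Consistency - Chapter 1/consistency_chapter_1.py | get_replace_time
-- ===== SOURCE A (Python) =====
-- VOWELS = ["A", "E", "I", "O", "U"]
--
-- def is_vowel(ch):
--     return ch in VOWELS
--
-- def get_replace_time(string, replace_with):
--     time = 0
--     is_replace_with_vowel = is_vowel(replace_with)
--     for ch in string:
--         if ch == replace_with:
--             continue
--         time += 2 if is_replace_with_vowel == is_vowel(ch) else 1
--     return time
-- ===== SOURCE B (Python) =====
-- VOWELS = ["A", "E", "I", "O", "U"]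
--
-- def is_vowel(ch):
--     return ch in VOWELS
--
-- def get_replace_time(string, replace_with):
--     N = len(string)
--     V = sum(is_vowel(ch) for ch in string)
--     E = sum(ch == replace_with for ch in string)
--     if is_vowel(replace_with):
--         return 2 * (V - E) + (N - V)
--     return 2 * (N - V - E) + V
-- ===== Notes on version B (the rewrite author's own statement) =====
-- stated objective: alternative
-- what changed: Replaces the per-character conditional accumulation loop with three tallies (length, vowel count, count of chars equal to the target) combined by a closed-form arithmetic expression split on whether the target is a vowel.
import Mathlib
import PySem

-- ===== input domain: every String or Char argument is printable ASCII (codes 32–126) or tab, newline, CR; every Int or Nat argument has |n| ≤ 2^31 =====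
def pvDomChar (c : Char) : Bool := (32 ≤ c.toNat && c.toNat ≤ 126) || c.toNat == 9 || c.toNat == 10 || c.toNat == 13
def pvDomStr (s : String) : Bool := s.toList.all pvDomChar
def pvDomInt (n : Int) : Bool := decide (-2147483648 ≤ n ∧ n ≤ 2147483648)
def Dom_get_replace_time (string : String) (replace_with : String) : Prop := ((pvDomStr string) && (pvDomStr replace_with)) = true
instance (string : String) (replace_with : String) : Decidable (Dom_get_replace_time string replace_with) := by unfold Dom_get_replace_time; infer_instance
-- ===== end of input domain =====

-- B replaces A's per-character accumulation loop with count-then-closed-form arithmetic (alternative decomposition, same cost).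


-- ===== PORT A =====
-- is_vowel: membership of a (one-char) string in VOWELS
def pvIsVowel (s : String) : Bool := ["A", "E", "I", "O", "U"].contains s

def get_replace_time (string : String) (replace_with : String) : Int :=
  let is_replace_with_vowel := pvIsVowel replace_with
  string.toList.foldl
    (fun time ch =>
      if String.mk [ch] == replace_with then time
      else time + (if is_replace_with_vowel == pvIsVowel (String.mk [ch]) then 2 else 1))
    0

-- ===== PORT B =====
def get_replace_time_alt (string : String) (replace_with : String) : Int :=
  let N : Int := string.toList.length
  let V : Int := string.toList.countP (fun ch => pvIsVowel (String.mk [ch]))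
  let E : Int := string.toList.countP (fun ch => String.mk [ch] == replace_with)
  if pvIsVowel replace_with then 2 * (V - E) + (N - V)
  else 2 * (N - V - E) + V

-- ===== PRECONDITION & SPEC =====
def Spec_get_replace_time (string : String) (replace_with : String) (out : Int) : Prop := out = get_replace_time_alt string replace_with
instance (string : String) (replace_with : String) (out : Int) : Decidable (Spec_get_replace_time string replace_with out) := by unfold Spec_get_replace_time; infer_instance

-- ===== CLAIM (what is proved, stated in full; the proofs are below) =====
def Claim_equal_get_replace_time : Prop := ∀ (string : String) (replace_with : String), Dom_get_replace_time string replace_with → Spec_get_replace_time string replace_with (get_replace_time string replace_with)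

-- ===== LEMMAS AND PROOFS =====

lemma fold_closed (rw : String) (l : List Char) (t : Int) :
    l.foldl
      (fun time ch =>
        if String.mk [ch] == rw then time
        else time + (if pvIsVowel rw == pvIsVowel (String.mk [ch]) then 2 else 1))
      t
    = t + (if pvIsVowel rw then
        2 * ((l.countP (fun ch => pvIsVowel (String.mk [ch])) : Int)
              - (l.countP (fun ch => String.mk [ch] == rw) : Int))
          + ((l.length : Int) - (l.countP (fun ch => pvIsVowel (String.mk [ch])) : Int))
      else
        2 * ((l.length : Int) - (l.countP (fun ch => pvIsVowel (String.mk [ch])) : Int)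
              - (l.countP (fun ch => String.mk [ch] == rw) : Int))
          + (l.countP (fun ch => pvIsVowel (String.mk [ch])) : Int)) := by
  induction l generalizing t with
  | nil => simp
  | cons ch l ih =>
    simp only [List.foldl_cons, List.countP_cons, List.length_cons, ih]
    by_cases h1 : String.mk [ch] = rw
    · have h2 : pvIsVowel (String.mk [ch]) = pvIsVowel rw := by rw [h1]
      by_cases hv : pvIsVowel rw <;> simp [h1, h2, hv] <;> push_cast <;> ring
    · by_cases hv : pvIsVowel rw <;> by_cases hc : pvIsVowel (String.mk [ch]) <;>
        simp [h1, hv, hc] <;> push_cast <;> ring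

-- ===== VERDICT (by name: the statement is the Claim_ definition above) =====
theorem get_replace_time_spec : Claim_equal_get_replace_time := by
  intro string replace_with _
  unfold Spec_get_replace_time get_replace_time get_replace_time_alt
  simpa using fold_closed replace_with string.toList 0
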